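-- pv_equiv track=rewrite | github.com/Fikri1902/Eggcelent | rth_optimizer.py | compute_manhattan_distance_matrix
-- ===== SOURCE A (Python) =====
-- def compute_manhattan_distance_matrix(locations):
--     """Membuat matriks jarak menggunakan Jarak Manhattan."""
--     num_locations = len(locations)
--     distance_matrix = {}
--     for from_node in range(num_locations):
--         distance_matrix[from_node] = {}
--         for to_node in range(num_locations):
--             if from_node == to_node:
--                 distance_matrix[from_node][to_node] = 0
--             else:
--                 dist = (abs(locations[from_node][1][0] - locations[to_node][1][0]) +
--                         abs(locations[from_node][1][1] - locations[to_node][1][1]))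
--                 distance_matrix[from_node][to_node] = dist
--     return distance_matrix
-- ===== SOURCE B (Python) =====
-- def compute_manhattan_distance_matrix(locations):
--     """Membuat matriks jarak menggunakan Jarak Manhattan."""
--     # Chebyshev transform: with u = x + y, v = x - y,
--     # |xi-xj| + |yi-yj| == max(|ui-uj|, |vi-vj|)  (and the diagonal is 0 for free).
--     diag = [(x + y, x - y) for _, (x, y) in locations]
--     return {i: {j: max(abs(ui - uj), abs(vi - vj)) for j, (uj, vj) in enumerate(diag)}
--             for i, (ui, vi) in enumerate(diag)}
-- ===== Notes on version B (the rewrite author's own statement) =====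
-- stated objective: alternative
-- what changed: B first rotates every point into Chebyshev coordinates (u=x+y, v=x-y) and then builds the matrix as a dict comprehension over enumerate, computing each cell as max(|ui-uj|,|vi-vj|) — a different distance formula with no diagonal branch and no index-based lookups, instead of A's nested range loops with a from==to branch and abs-sum per ordered cell.
import Mathlib
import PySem

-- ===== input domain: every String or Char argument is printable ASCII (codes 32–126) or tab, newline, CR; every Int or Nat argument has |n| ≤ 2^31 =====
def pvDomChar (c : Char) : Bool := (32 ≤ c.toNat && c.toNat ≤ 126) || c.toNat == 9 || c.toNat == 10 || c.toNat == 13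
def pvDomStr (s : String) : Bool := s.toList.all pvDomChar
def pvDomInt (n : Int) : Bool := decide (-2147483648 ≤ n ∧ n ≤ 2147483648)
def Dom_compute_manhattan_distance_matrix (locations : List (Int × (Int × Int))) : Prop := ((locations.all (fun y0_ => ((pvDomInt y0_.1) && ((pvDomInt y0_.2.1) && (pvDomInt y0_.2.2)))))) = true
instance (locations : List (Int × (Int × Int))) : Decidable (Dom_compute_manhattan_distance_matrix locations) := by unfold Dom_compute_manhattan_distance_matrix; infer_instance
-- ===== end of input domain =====

-- B rotates points into Chebyshev coordinates (u=x+y, v=x-y) and builds the matrix by a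
-- comprehension over enumerate with cell max(|du|,|dv|); same values, no diagonal branch.

-- ===== PORT A =====
-- indices drawn from range(num_locations) are always in bounds, so pyGetD with a dummy default is exact for locations[...]
def compute_manhattan_distance_matrix (locations : List (Int × (Int × Int))) : List (Int × List (Int × Int)) :=
  let num_locations : Int := PySem.List.len locations
  let dm : PySem.Dict Int (PySem.Dict Int Int) :=
    (PySem.List.pyRange 0 num_locations 1).foldl (fun dm from_node =>
      let row : PySem.Dict Int Int :=
        (PySem.List.pyRange 0 num_locations 1).foldl (fun row to_node =>
          if from_node = to_node then row.insert to_node 0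
          else
            let pf := PySem.List.pyGetD locations from_node (0, (0, 0))
            let pt := PySem.List.pyGetD locations to_node (0, (0, 0))
            row.insert to_node (|pf.2.1 - pt.2.1| + |pf.2.2 - pt.2.2|)) PySem.Dict.empty
      dm.insert from_node row) PySem.Dict.empty
  dm.items.map (fun p => (p.1, p.2.items))

-- ===== PORT B =====
def compute_manhattan_distance_matrix_alt (locations : List (Int × (Int × Int))) : List (Int × List (Int × Int)) :=
  let diag : List (Int × Int) :=
    locations.map (fun p => (p.2.1 + p.2.2, p.2.1 - p.2.2))
  (PySem.List.enumerate diag).map (fun q =>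
    (q.1, (PySem.List.enumerate diag).map (fun r =>
      (r.1, max |q.2.1 - r.2.1| |q.2.2 - r.2.2|))))

-- ===== PRECONDITION & SPEC =====
def Spec_compute_manhattan_distance_matrix (locations : List (Int × (Int × Int))) (out : List (Int × List (Int × Int))) : Prop := out = compute_manhattan_distance_matrix_alt locations
instance (locations : List (Int × (Int × Int))) (out : List (Int × List (Int × Int))) : Decidable (Spec_compute_manhattan_distance_matrix locations out) := by unfold Spec_compute_manhattan_distance_matrix; infer_instance

-- ===== CLAIM (what is proved, stated in full; the proofs are below) =====
def Claim_equal_compute_manhattan_distance_matrix : Prop := ∀ (locations : List (Int × (Int × Int))), Dom_compute_manhattan_distance_matrix locations → Spec_compute_manhattan_distance_matrix locations (compute_manhattan_distance_matrix locations)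

-- ===== LEMMAS AND PROOFS =====

-- A's cell value: 0 on the diagonal, Manhattan distance off it
def pvD (coords : List (Int × Int)) (i j : Int) : Int :=
  if i = j then 0
  else |(PySem.List.pyGetD coords i (0, 0)).1 - (PySem.List.pyGetD coords j (0, 0)).1|
     + |(PySem.List.pyGetD coords i (0, 0)).2 - (PySem.List.pyGetD coords j (0, 0)).2|

def pvRow (coords : List (Int × Int)) (n i : Int) : List (Int × Int) :=
  (PySem.List.pyRange 0 n 1).map (fun j => (j, pvD coords i j))

theorem pvManh (a b : Int) : |a| + |b| = max |a + b| |a - b| := by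
  simp only [Int.abs_eq_natAbs]; omega

theorem pvD_getD (locations : List (Int × (Int × Int))) (i j : Int) (h : i ≠ j) :
    pvD (locations.map (·.2)) i j =
      |(PySem.List.pyGetD locations i (0, (0, 0))).2.1 - (PySem.List.pyGetD locations j (0, (0, 0))).2.1|
    + |(PySem.List.pyGetD locations i (0, (0, 0))).2.2 - (PySem.List.pyGetD locations j (0, (0, 0))).2.2| := by
  have hi := PySem.List.pyGetD_map (fun p : Int × (Int × Int) => p.2) locations i (0, (0, 0))
  have hj := PySem.List.pyGetD_map (fun p : Int × (Int × Int) => p.2) locations j (0, (0, 0))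
  unfold pvD
  simp only [if_neg h]
  rw [show ((0 : Int), (0 : Int)) = ((fun p : Int × (Int × Int) => p.2) (0, (0, 0))) from rfl, hi, hj]

-- A's inner loop builds exactly the row of pvD values
theorem innerA (locations : List (Int × (Int × Int))) (n i : Int) :
    ((PySem.List.pyRange 0 n 1).foldl (fun row to_node =>
      if i = to_node then row.insert to_node 0
      else
        let pf := PySem.List.pyGetD locations i (0, (0, 0))
        let pt := PySem.List.pyGetD locations to_node (0, (0, 0))
        row.insert to_node (|pf.2.1 - pt.2.1| + |pf.2.2 - pt.2.2|)) (PySem.Dict.empty : PySem.Dict Int Int)).items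
    = pvRow (locations.map (·.2)) n i := by
  rw [PySem.List.foldl_congr_mem _ _
    (fun (row : PySem.Dict Int Int) to_node => row.insert to_node (pvD (locations.map (·.2)) i to_node)) _
    (by
      intro acc x _
      rcases eq_or_ne i x with h | h
      · simp [h, pvD]
      · simp only [if_neg h, pvD_getD locations i x h])]
  rw [PySem.Dict.items_foldl_insert_fresh _ (fun j => j) _ _
    (by intro a _; simp [PySem.Dict.contains_empty])
    (by simpa using PySem.List.nodup_pyRange_one 0 n)]
  simp [pvRow, PySem.Dict.empty]

theorem portA_eq (locations : List (Int × (Int × Int))) :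
    compute_manhattan_distance_matrix locations =
      (PySem.List.pyRange 0 (PySem.List.len locations) 1).map
        (fun i => (i, pvRow (locations.map (·.2)) (PySem.List.len locations) i)) := by
  simp only [compute_manhattan_distance_matrix]
  rw [PySem.Dict.items_foldl_insert_fresh _ (fun i => i) _ _
    (by intro a _; simp [PySem.Dict.contains_empty])
    (by simpa using PySem.List.nodup_pyRange_one 0 (PySem.List.len locations))]
  rw [show (PySem.Dict.empty : PySem.Dict Int (PySem.Dict Int Int)).items = [] from rfl, List.nil_append, List.map_map]
  refine List.map_congr_left ?_
  intro i _
  simp only [Function.comp_def]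
  exact congrArg (fun r => (i, r)) (innerA locations (PySem.List.len locations) i)

theorem pvCellB (locations : List (Int × (Int × Int))) (i j : Int) :
    max |(PySem.List.pyGetD (locations.map (fun p => (p.2.1 + p.2.2, p.2.1 - p.2.2))) i (0, 0)).1
         - (PySem.List.pyGetD (locations.map (fun p => (p.2.1 + p.2.2, p.2.1 - p.2.2))) j (0, 0)).1|
        |(PySem.List.pyGetD (locations.map (fun p => (p.2.1 + p.2.2, p.2.1 - p.2.2))) i (0, 0)).2
         - (PySem.List.pyGetD (locations.map (fun p => (p.2.1 + p.2.2, p.2.1 - p.2.2))) j (0, 0)).2|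
    = pvD (locations.map (·.2)) i j := by
  have hi := PySem.List.pyGetD_map (fun p : Int × (Int × Int) => (p.2.1 + p.2.2, p.2.1 - p.2.2)) locations i (0, (0, 0))
  have hj := PySem.List.pyGetD_map (fun p : Int × (Int × Int) => (p.2.1 + p.2.2, p.2.1 - p.2.2)) locations j (0, (0, 0))
  rw [show ((0 : Int), (0 : Int)) = ((fun p : Int × (Int × Int) => (p.2.1 + p.2.2, p.2.1 - p.2.2)) (0, (0, 0))) from rfl, hi, hj]
  rcases eq_or_ne i j with h | h
  · simp [h, pvD]
  · rw [pvD_getD locations i j h, pvManh]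
    congr 1 <;> congr 1 <;> ring

theorem portB_eq (locations : List (Int × (Int × Int))) :
    compute_manhattan_distance_matrix_alt locations =
      (PySem.List.pyRange 0 (PySem.List.len locations) 1).map
        (fun i => (i, pvRow (locations.map (·.2)) (PySem.List.len locations) i)) := by
  simp only [compute_manhattan_distance_matrix_alt]
  rw [PySem.List.enumerate_eq_map_pyRange (d := ((0 : Int), (0 : Int)))]
  have hlen : PySem.List.len (locations.map (fun p => (p.2.1 + p.2.2, p.2.1 - p.2.2)))
      = PySem.List.len locations := by simp [PySem.List.len_eq]
  rw [hlen, List.map_map]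
  refine List.map_congr_left ?_
  intro i _
  simp only [Function.comp_def]
  refine congrArg (fun r => (i, r)) ?_
  rw [List.map_map]
  unfold pvRow
  refine List.map_congr_left ?_
  intro j _
  simp only [Function.comp_def]
  exact congrArg (fun v => (j, v)) (pvCellB locations i j)

-- ===== VERDICT (by name: the statement is the Claim_ definition above) =====
theorem compute_manhattan_distance_matrix_spec : Claim_equal_compute_manhattan_distance_matrix := by
  intro locations _
  unfold Spec_compute_manhattan_distance_matrix
  rw [portA_eq, portB_eq]
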